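-- pv_equiv track=rewrite | github.com/ConnAALL/evoAtariBench | data/previous_benchmark_scores/_combine_results.py | _safe_unique_name
-- ===== SOURCE A (Python) =====
-- def _safe_unique_name(base: str, used: set[str], suffix: str) -> str:
--     if base not in used:
--         used.add(base)
--         return base
--     cand = f"{base}__{suffix}"
--     if cand not in used:
--         used.add(cand)
--         return cand
--     i = 2
--     while True:
--         cand2 = f"{base}__{suffix}__{i}"
--         if cand2 not in used:
--             used.add(cand2)
--             return cand2
--         i += 1
-- ===== SOURCE B (Python) =====
-- def _safe_unique_name(base: str, used: set, suffix: str) -> str: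
--     if base not in used:
--         used.add(base)
--         return base
--     cand = f"{base}__{suffix}"
--     if cand not in used:
--         used.add(cand)
--         return cand
--     prefix = cand + "__"
--     tails = {name[len(prefix):] for name in used if name.startswith(prefix)}
--     i = min(k for k in range(2, len(tails) + 3) if str(k) not in tails)
--     res = f"{base}__{suffix}__{i}"
--     used.add(res)
--     return res
-- ===== Notes on version B (the rewrite author's own statement) =====
-- stated objective: alternative
-- what changed: Instead of A's unbounded probe-until-free while loop over candidate strings, B makes one pass over `used` collecting the set of tails behind the prefix 'base__suffix__' and then picks the index with a bounded min over range(2, len(tails)+3).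
import Mathlib
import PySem

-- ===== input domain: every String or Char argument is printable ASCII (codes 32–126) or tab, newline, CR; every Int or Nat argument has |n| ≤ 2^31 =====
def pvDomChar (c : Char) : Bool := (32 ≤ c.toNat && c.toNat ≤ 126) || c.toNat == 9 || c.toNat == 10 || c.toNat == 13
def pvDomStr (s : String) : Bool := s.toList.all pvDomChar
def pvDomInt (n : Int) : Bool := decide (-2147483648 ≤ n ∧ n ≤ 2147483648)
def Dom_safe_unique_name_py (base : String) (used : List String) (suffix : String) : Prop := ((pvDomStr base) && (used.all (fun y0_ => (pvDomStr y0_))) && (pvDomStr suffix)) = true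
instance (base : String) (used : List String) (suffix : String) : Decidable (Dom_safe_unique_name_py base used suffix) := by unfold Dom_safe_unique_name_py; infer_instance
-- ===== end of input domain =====

-- B replaces A's unbounded probe-until-free loop by one pass over `used` that collects the
-- numeric-slot tails behind "base__suffix__", then picks the smallest free index by a bounded
-- min over range(2, len(tails)+3); equivalence is about the RETURN value only (both Pythons
-- also add the returned name to `used` in place, identically).

-- ===== PORT A =====
-- A's `while True` loop, with fuel; fuel used.length+1 suffices (proved below: the first free
-- index is at most used.length+2), so the fuel-exhaustion arm is never reached.
def pyA_while (base : String) (suffix : String) (used : List String) : Nat → Nat → String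
  | 0, i => base ++ "__" ++ suffix ++ "__" ++ PySem.Int.toStr (i : Int)   -- unreachable
  | fuel+1, i =>
    let cand2 := base ++ "__" ++ suffix ++ "__" ++ PySem.Int.toStr (i : Int)
    if used.contains cand2 then pyA_while base suffix used fuel (i+1) else cand2

def safe_unique_name_py (base : String) (used : List String) (suffix : String) : String :=
  if ¬ used.contains base then base
  else
    let cand := base ++ "__" ++ suffix
    if ¬ used.contains cand then cand
    else pyA_while base suffix used (used.length + 1) 2

-- ===== PORT B =====
-- the set comprehension {name[len(prefix):] for name in used if name.startswith(prefix)}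
def pyB_tails (pre : String) (used : List String) : PySem.Set String :=
  used.foldl
    (fun acc name =>
      if PySem.Str.startswith name pre then
        PySem.Set.add acc (PySem.Str.slice name (some (PySem.Str.len pre)) none)
      else acc)
    PySem.Set.empty

def safe_unique_name_py_alt (base : String) (used : List String) (suffix : String) : String :=
  if ¬ used.contains base then base
  else
    let cand := base ++ "__" ++ suffix
    if ¬ used.contains cand then cand
    else
      let pre := cand ++ "__"
      let tails := pyB_tails pre used
      -- min(k for k in range(2, len(tails) + 3) if str(k) not in tails); the list is proved
      -- nonempty below, so Python's min never raises and the .getD default is never used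
      let i := (PySem.List.min?
                  ((PySem.List.pyRange 2 (PySem.Set.len tails + 3) 1).filter
                    (fun k => !(PySem.Set.contains tails (PySem.Int.toStr k))))
                  (fun x => x)).getD 2
      base ++ "__" ++ suffix ++ "__" ++ PySem.Int.toStr i

-- ===== PRECONDITION & SPEC =====
def Spec_safe_unique_name_py (base : String) (used : List String) (suffix : String) (out : String) : Prop := out = safe_unique_name_py_alt base used suffix
instance (base : String) (used : List String) (suffix : String) (out : String) : Decidable (Spec_safe_unique_name_py base used suffix out) := by unfold Spec_safe_unique_name_py; infer_instance

-- ===== CLAIM (what is proved, stated in full; the proofs are below) =====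
def Claim_equal_safe_unique_name_py : Prop := ∀ (base : String) (used : List String) (suffix : String), Dom_safe_unique_name_py base used suffix → Spec_safe_unique_name_py base used suffix (safe_unique_name_py base used suffix)

-- ===== LEMMAS AND PROOFS =====

-- decimal digit characters determine the digit
lemma digitChar_inj (m n : Nat) (hm : m < 10) (hn : n < 10)
    (h : m.digitChar = n.digitChar) : m = n := by
  interval_cases m <;> interval_cases n <;> revert h <;> decide

lemma two_le_length_toDigits (k : Nat) (hk : ¬ k < 10) : 2 ≤ (Nat.toDigits 10 k).length := by
  by_contra hlen
  have h10 := (Nat.length_toDigits_le_iff (b := 10) (n := k) (k := 1)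
    (by norm_num) (by norm_num)).mp (by omega)
  exact hk (by simpa using h10)

-- Nat.toDigits 10 is injective (hence so is str on nonnegative numbers)
lemma toDigits10_inj (m : Nat) : ∀ n : Nat, Nat.toDigits 10 m = Nat.toDigits 10 n → m = n := by
  induction m using Nat.strong_induction_on with
  | _ m ih =>
    intro n h
    by_cases h1 : m < 10 <;> by_cases h2 : n < 10
    · rw [Nat.toDigits_of_lt_base h1, Nat.toDigits_of_lt_base h2] at h
      exact digitChar_inj m n h1 h2 (by simpa using h)
    · exfalso
      have hl := congrArg List.length h
      rw [Nat.toDigits_of_lt_base h1] at hl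
      have := two_le_length_toDigits n h2
      simp at hl; omega
    · exfalso
      have hl := congrArg List.length h
      rw [Nat.toDigits_of_lt_base h2] at hl
      have := two_le_length_toDigits m h1
      simp at hl; omega
    · rw [Nat.toDigits_eq_if (b := 10) (n := m) (by norm_num),
         Nat.toDigits_eq_if (b := 10) (n := n) (by norm_num), if_neg h1, if_neg h2] at h
      obtain ⟨hhead, htail⟩ := List.append_inj' h rfl
      have hdiv : m / 10 = n / 10 :=
        ih (m / 10) (Nat.div_lt_self (by omega) (by norm_num)) (n / 10) hhead
      have hmod : m % 10 = n % 10 :=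
        digitChar_inj _ _ (Nat.mod_lt _ (by norm_num)) (Nat.mod_lt _ (by norm_num))
          (by simpa using htail)
      omega

-- str is injective on the nonnegative integers
lemma toStr_inj_nonneg (a b : Int) (ha : 0 ≤ a) (hb : 0 ≤ b)
    (h : PySem.Int.toStr a = PySem.Int.toStr b) : a = b := by
  have h' : PySem.Int.toChars a = PySem.Int.toChars b := by
    have := congrArg String.toList h
    simpa [PySem.Int.toList_toStr] using this
  unfold PySem.Int.toChars at h'
  rw [if_neg (by omega), if_neg (by omega)] at h'
  have := toDigits10_inj a.toNat b.toNat h'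
  omega

-- decomposing a string that starts with `pre`
lemma slice_decomp (pre name : String) (h : PySem.Str.startswith name pre = true) :
    pre ++ PySem.Str.slice name (some (PySem.Str.len pre)) none = name := by
  rw [PySem.Str.startswith_eq, PySem.Chars.startswith_iff] at h
  obtain ⟨rest, hrest⟩ := h
  apply String.toList_inj.mp
  simp [PySem.Str.slice, PySem.Str.len, ← hrest, PySem.List.slice_from_natCast]

lemma startswith_append (pre t : String) : PySem.Str.startswith (pre ++ t) pre = true := by
  rw [PySem.Str.startswith_eq, PySem.Chars.startswith_iff, String.toList_append]
  exact List.prefix_append _ _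

lemma slice_of_append (pre t : String) :
    PySem.Str.slice (pre ++ t) (some (PySem.Str.len pre)) none = t := by
  apply String.toList_inj.mp
  simp [PySem.Str.slice, PySem.Str.len, String.toList_append, PySem.List.slice_from_natCast]

-- membership in the tail set: t ∈ tails ↔ pre ++ t ∈ used
lemma mem_tails_fold (pre : String) (used : List String) :
    ∀ (acc : PySem.Set String) (t : String),
      t ∈ used.foldl
        (fun acc name =>
          if PySem.Str.startswith name pre then
            PySem.Set.add acc (PySem.Str.slice name (some (PySem.Str.len pre)) none)
          else acc) acc ↔
      t ∈ acc ∨ ∃ name ∈ used, PySem.Str.startswith name pre = true ∧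
          PySem.Str.slice name (some (PySem.Str.len pre)) none = t := by
  induction used with
  | nil => intro acc t; simp
  | cons hd tl ih =>
    intro acc t
    simp only [List.foldl_cons, List.mem_cons]
    rw [ih]
    by_cases h : PySem.Str.startswith hd pre = true
    · simp only [if_pos h, PySem.Set.mem_add]
      constructor
      · rintro (⟨hacc | heq⟩ | hex)
        · exact Or.inl hacc
        · exact Or.inr ⟨hd, Or.inl rfl, h, heq.symm⟩
        · obtain ⟨nm, hnm, hs, hsl⟩ := hex; exact Or.inr ⟨nm, Or.inr hnm, hs, hsl⟩
      · rintro (hacc | ⟨nm, hnm | hnm, hs, hsl⟩)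
        · exact Or.inl (Or.inl hacc)
        · exact Or.inl (Or.inr (by rw [← hsl, hnm]))
        · exact Or.inr ⟨nm, hnm, hs, hsl⟩
    · simp only [if_neg h]
      constructor
      · rintro (hacc | hex)
        · exact Or.inl hacc
        · obtain ⟨nm, hnm, hs, hsl⟩ := hex; exact Or.inr ⟨nm, Or.inr hnm, hs, hsl⟩
      · rintro (hacc | ⟨nm, hnm | hnm, hs, hsl⟩)
        · exact Or.inl hacc
        · exact absurd (hnm ▸ hs) (by simpa using h)
        · exact Or.inr ⟨nm, hnm, hs, hsl⟩

lemma mem_tails (pre : String) (used : List String) (t : String) :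
    t ∈ pyB_tails pre used ↔ (pre ++ t) ∈ used := by
  unfold pyB_tails
  rw [mem_tails_fold]
  constructor
  · rintro (h | ⟨nm, hnm, hs, hsl⟩)
    · simp [PySem.Set.empty] at h
    · rwa [← hsl, slice_decomp pre nm hs]
  · intro h
    exact Or.inr ⟨pre ++ t, h, startswith_append pre t, slice_of_append pre t⟩

lemma tails_len_fold (pre : String) (used : List String) :
    ∀ (acc : PySem.Set String),
      (used.foldl
        (fun acc name =>
          if PySem.Str.startswith name pre then
            PySem.Set.add acc (PySem.Str.slice name (some (PySem.Str.len pre)) none)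
          else acc) acc).length ≤ acc.length + used.length := by
  induction used with
  | nil => intro acc; simp
  | cons hd tl ih =>
    intro acc
    simp only [List.foldl_cons, List.length_cons]
    refine le_trans (ih _) ?_
    have : (if PySem.Str.startswith hd pre then
        PySem.Set.add acc (PySem.Str.slice hd (some (PySem.Str.len pre)) none)
      else acc).length ≤ acc.length + 1 := by
      split
      · unfold PySem.Set.add; split <;> simp
      · simp
    omega

-- nodup subset length comparison
lemma nodup_subset_length {α : Type} [DecidableEq α] (l m : List α)
    (h : l.Nodup) (h2 : l ⊆ m) : l.length ≤ m.length := by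
  calc l.length = l.toFinset.card := (List.toFinset_card_of_nodup h).symm
  _ ≤ m.toFinset.card := Finset.card_le_card (by
      intro x hx; simp only [List.mem_toFinset] at *; exact h2 hx)
  _ ≤ m.length := m.toFinset_card_le

-- A's fueled loop returns pre ++ str m as soon as m is the first free index ≥ the current one
lemma pyA_while_eq (base suffix : String) (used : List String) (m : Int)
    (hfree : ¬ ((base ++ "__" ++ suffix ++ "__" ++ PySem.Int.toStr m) ∈ used)) :
    ∀ (fuel i : Nat), (i : Int) ≤ m → (m : Int) < (i : Int) + (fuel : Int) →
      (∀ k : Int, (i : Int) ≤ k → k < m → (base ++ "__" ++ suffix ++ "__" ++ PySem.Int.toStr k) ∈ used) →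
      pyA_while base suffix used fuel i = base ++ "__" ++ suffix ++ "__" ++ PySem.Int.toStr m := by
  intro fuel
  induction fuel with
  | zero => intro i h1 h2 _; exfalso; omega
  | succ n ih =>
    intro i h1 h2 htaken
    by_cases heq : (i : Int) = m
    · have hnc : ¬ used.contains (base ++ "__" ++ suffix ++ "__" ++ PySem.Int.toStr (i : Int)) = true := by
        rw [heq]; simpa [List.contains_iff_mem] using hfree
      simp only [pyA_while]
      rw [if_neg hnc, heq]
    · have hlt : (i : Int) < m := lt_of_le_of_ne h1 heq
      have hc : used.contains (base ++ "__" ++ suffix ++ "__" ++ PySem.Int.toStr (i : Int)) := by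
        rw [List.contains_iff_mem]
        exact htaken i le_rfl hlt
      simp only [pyA_while, if_pos hc]
      apply ih
      · push_cast; omega
      · push_cast; push_cast at h2; omega
      · intro k hk1 hk2
        apply htaken k _ hk2
        push_cast at hk1; omega

-- ===== VERDICT (by name: the statement is the Claim_ definition above) =====
theorem safe_unique_name_py_spec : Claim_equal_safe_unique_name_py := by
  intro base used suffix _
  unfold Spec_safe_unique_name_py safe_unique_name_py safe_unique_name_py_alt
  by_cases hb : used.contains base
  · rw [if_neg (not_not_intro hb), if_neg (not_not_intro hb)]
    by_cases hc : used.contains (base ++ "__" ++ suffix)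
    · show (if ¬ _ = true then _ else pyA_while base suffix used (used.length + 1) 2) = _
      rw [if_neg (not_not_intro hc), if_neg (not_not_intro hc)]
      -- the interesting branch: A's probing loop vs B's tail-set minimum
      set pre := base ++ "__" ++ suffix ++ "__" with hpre
      show pyA_while base suffix used (used.length + 1) 2 =
        pre ++ PySem.Int.toStr ((PySem.List.min?
          ((PySem.List.pyRange 2 (PySem.Set.len (pyB_tails pre used) + 3) 1).filter
            (fun k => !(PySem.Set.contains (pyB_tails pre used) (PySem.Int.toStr k))))
          (fun x => x)).getD 2)
      set tails := pyB_tails pre used with htails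
      set t := tails.length with ht
      set F := ((PySem.List.pyRange 2 (PySem.Set.len tails + 3) 1).filter
                  (fun k => !(PySem.Set.contains tails (PySem.Int.toStr k)))) with hF
      have hlen : PySem.Set.len tails = (t : Int) := rfl
      -- the filtered candidate list is nonempty
      have hne : F ≠ [] := by
        intro hnil
        have hall : ∀ k ∈ PySem.List.pyRange 2 ((t : Int) + 3) 1,
            PySem.Int.toStr k ∈ tails := by
          intro k hk
          by_contra hnot
          have hkF : k ∈ F := by
            rw [hF, List.mem_filter, hlen]
            exact ⟨hk, by simpa [PySem.Set.contains, List.contains_iff_mem] using hnot⟩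
          rw [hnil] at hkF
          exact absurd hkF (List.not_mem_nil)
        have hsub : (PySem.List.pyRange 2 ((t : Int) + 3) 1).map PySem.Int.toStr ⊆ tails := by
          intro x hx
          obtain ⟨k, hk, rfl⟩ := List.mem_map.mp hx
          exact hall k hk
        have hnd : ((PySem.List.pyRange 2 ((t : Int) + 3) 1).map PySem.Int.toStr).Nodup := by
          apply List.Nodup.map_on _ (PySem.List.nodup_pyRange_one 2 ((t : Int) + 3))
          intro x hx y hy hxy
          rw [PySem.List.mem_pyRange_one] at hx hy
          exact toStr_inj_nonneg x y (by omega) (by omega) hxy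
        have hle := nodup_subset_length _ _ hnd hsub
        rw [List.length_map, PySem.List.length_pyRange_one] at hle
        omega
      cases hm : PySem.List.min? F (fun x => x) with
      | none => exact absurd ((PySem.List.min?_eq_none_iff F (fun x => x)).mp hm) hne
      | some m =>
        rw [Option.getD_some]
        have hmF := PySem.List.min?_mem hm
        have hmin : ∀ y ∈ F, m ≤ y := PySem.List.min?_isMin hm
        rw [hF, List.mem_filter, hlen, PySem.List.mem_pyRange_one] at hmF
        obtain ⟨⟨hm2, hmt⟩, hmfree⟩ := hmF
        have hfree : ¬ ((pre ++ PySem.Int.toStr m) ∈ used) := by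
          rw [← mem_tails pre used]
          simpa [PySem.Set.contains, List.contains_iff_mem] using hmfree
        have htaken : ∀ k : Int, (2 : Int) ≤ k → k < m →
            (pre ++ PySem.Int.toStr k) ∈ used := by
          intro k hk1 hk2
          rw [← mem_tails pre used]
          by_contra hnot
          have hkF : k ∈ F := by
            rw [hF, List.mem_filter, hlen, PySem.List.mem_pyRange_one]
            exact ⟨⟨hk1, by omega⟩,
              by simpa [PySem.Set.contains, List.contains_iff_mem] using hnot⟩
          exact absurd (hmin k hkF) (by omega)
        have htle : t ≤ used.length := by
          have hfold := tails_len_fold pre used PySem.Set.empty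
          simpa [pyB_tails, PySem.Set.empty, htails, ht] using hfold
        exact pyA_while_eq base suffix used m hfree (used.length + 1) 2
          (by exact_mod_cast hm2) (by push_cast; omega)
          (fun k hk1 hk2 => htaken k (by exact_mod_cast hk1) hk2)
    · rw [if_pos hc, if_pos hc]
  · rw [if_pos hb, if_pos hb]
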